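-- pv_equiv track=rewrite | github.com/jrwilsonmichael-create/csc_141 | assignments /14_scoring/14_12_powerups.py | add_powerups
-- ===== SOURCE A (Python) =====
-- def add_powerups(player, powerups):
--     for powerup in powerups:
--         if powerup == "speed":
--             player["speed"] += 10
--         elif powerup == "strength":
--             player["strength"] += 5
--         elif powerup == "health":
--             player["health"] += 20
--     return player
-- ===== SOURCE B (Python) =====
-- def add_powerups(player, powerups):
--     # Aggregate per powerup type, then apply each total boost once.
--     for name, boost in (("speed", 10), ("strength", 5), ("health", 20)):
--         n = powerups.count(name)
--         if n:
--             player[name] += n * boost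
--     return player
-- ===== Notes on version B (the rewrite author's own statement) =====
-- stated objective: alternative
-- what changed: B aggregates: it counts each powerup type once with list.count and applies a single combined boost per type, instead of A's per-occurrence dict update inside the loop over powerups.
import Mathlib
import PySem

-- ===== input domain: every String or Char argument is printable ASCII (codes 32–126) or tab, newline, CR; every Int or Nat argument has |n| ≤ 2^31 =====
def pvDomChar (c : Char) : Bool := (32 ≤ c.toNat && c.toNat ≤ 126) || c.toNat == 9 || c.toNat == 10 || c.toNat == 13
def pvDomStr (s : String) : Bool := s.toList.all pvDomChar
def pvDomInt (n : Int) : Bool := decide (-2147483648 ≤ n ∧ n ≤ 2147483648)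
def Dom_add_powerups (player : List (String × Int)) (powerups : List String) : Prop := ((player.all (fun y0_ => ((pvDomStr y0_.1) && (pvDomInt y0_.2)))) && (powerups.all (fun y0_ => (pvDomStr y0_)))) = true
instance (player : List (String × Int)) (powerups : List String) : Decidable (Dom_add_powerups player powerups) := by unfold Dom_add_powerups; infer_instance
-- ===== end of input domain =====

-- B aggregates per powerup type (count, then one combined += per type) instead of A's
-- per-occurrence update; same cost, different decomposition (objective: alternative).
-- Both ports mutate the caller's dict in the Python sources; equivalence here is about the return value.

-- `d[k] += v` on a dict rendered as an assoc list with unique keys: add v at the matching key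
def bumpKey (d : List (String × Int)) (k : String) (v : Int) : List (String × Int) :=
  d.map (fun e => if e.1 == k then (e.1, e.2 + v) else e)

-- ===== PORT A =====
def add_powerups (player : List (String × Int)) (powerups : List String) : List (String × Int) :=
  powerups.foldl (fun d powerup =>
    if powerup == "speed" then bumpKey d "speed" 10
    else if powerup == "strength" then bumpKey d "strength" 5
    else if powerup == "health" then bumpKey d "health" 20
    else d) player

-- ===== PORT B =====
def add_powerups_alt (player : List (String × Int)) (powerups : List String) : List (String × Int) :=
  [("speed", (10 : Int)), ("strength", 5), ("health", 20)].foldl (fun d nb =>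
    let n := powerups.count nb.1
    if n ≠ 0 then bumpKey d nb.1 ((n : Int) * nb.2) else d) player

-- ===== PRECONDITION & SPEC =====
-- Pre_ excludes exactly the inputs where Python A raises KeyError: a powerup of a known type
-- occurring in `powerups` whose key is missing from `player` (B raises there too).
def Pre_add_powerups (player : List (String × Int)) (powerups : List String) : Prop :=
  ("speed" ∈ powerups → "speed" ∈ player.map Prod.fst) ∧
  ("strength" ∈ powerups → "strength" ∈ player.map Prod.fst) ∧
  ("health" ∈ powerups → "health" ∈ player.map Prod.fst)
instance (player : List (String × Int)) (powerups : List String) : Decidable (Pre_add_powerups player powerups) := by unfold Pre_add_powerups; infer_instance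

def pvWitness_add_powerups : (List (String × Int)) × List String :=
  ([("speed", 3), ("strength", 4), ("health", 25)], ["health", "speed", "banana", "speed"])

def Spec_add_powerups (player : List (String × Int)) (powerups : List String) (out : List (String × Int)) : Prop := out = add_powerups_alt player powerups
instance (player : List (String × Int)) (powerups : List String) (out : List (String × Int)) : Decidable (Spec_add_powerups player powerups out) := by unfold Spec_add_powerups; infer_instance

-- ===== CLAIM (what is proved, stated in full; the proofs are below) =====
def Claim_equal_add_powerups : Prop := ∀ (player : List (String × Int)) (powerups : List String), Dom_add_powerups player powerups → Pre_add_powerups player powerups → Spec_add_powerups player powerups (add_powerups player powerups)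

-- ===== LEMMAS AND PROOFS =====

theorem bumpKey_zero (d : List (String × Int)) (k : String) : bumpKey d k 0 = d := by
  simp [bumpKey]

theorem bumpKey_bumpKey_same (d : List (String × Int)) (k : String) (a b : Int) :
    bumpKey (bumpKey d k a) k b = bumpKey d k (a + b) := by
  simp only [bumpKey, List.map_map]
  refine List.map_congr_left (fun e _ => ?_)
  by_cases h : e.1 = k
  · simp [h, add_assoc]
  · simp [h]

theorem bumpKey_comm (d : List (String × Int)) (k k' : String) (a b : Int) (h : k ≠ k') :
    bumpKey (bumpKey d k a) k' b = bumpKey (bumpKey d k' b) k a := by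
  simp only [bumpKey, List.map_map]
  refine List.map_congr_left (fun e _ => ?_)
  by_cases h1 : e.1 = k <;> by_cases h2 : e.1 = k' <;> simp_all

-- B's body as a function of the three counts, with the zero-count guards removed
def app3 (d : List (String × Int)) (cs ct ch : Nat) : List (String × Int) :=
  bumpKey (bumpKey (bumpKey d "speed" ((cs : Int) * 10)) "strength" ((ct : Int) * 5)) "health" ((ch : Int) * 20)

theorem alt_eq_app3 (player : List (String × Int)) (powerups : List String) :
    add_powerups_alt player powerups =
      app3 player (powerups.count "speed") (powerups.count "strength") (powerups.count "health") := by
  simp only [add_powerups_alt, List.foldl, app3]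
  by_cases h1 : powerups.count "speed" = 0 <;>
    by_cases h2 : powerups.count "strength" = 0 <;>
      by_cases h3 : powerups.count "health" = 0 <;>
        simp [h1, h2, h3, bumpKey_zero]

theorem app3_speed (d : List (String × Int)) (cs ct ch : Nat) :
    app3 (bumpKey d "speed" 10) cs ct ch = app3 d (cs + 1) ct ch := by
  unfold app3
  rw [bumpKey_bumpKey_same]
  have e : (10 : Int) + (cs : Int) * 10 = ((cs + 1 : Nat) : Int) * 10 := by push_cast; ring
  rw [e]

theorem app3_strength (d : List (String × Int)) (cs ct ch : Nat) :
    app3 (bumpKey d "strength" 5) cs ct ch = app3 d cs (ct + 1) ch := by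
  unfold app3
  rw [bumpKey_comm _ "strength" "speed" _ _ (by decide), bumpKey_bumpKey_same]
  have e : (5 : Int) + (ct : Int) * 5 = ((ct + 1 : Nat) : Int) * 5 := by push_cast; ring
  rw [e]

theorem app3_health (d : List (String × Int)) (cs ct ch : Nat) :
    app3 (bumpKey d "health" 20) cs ct ch = app3 d cs ct (ch + 1) := by
  unfold app3
  rw [bumpKey_comm _ "health" "speed" _ _ (by decide),
      bumpKey_comm _ "health" "strength" _ _ (by decide), bumpKey_bumpKey_same]
  have e : (20 : Int) + (ch : Int) * 20 = ((ch + 1 : Nat) : Int) * 20 := by push_cast; ring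
  rw [e]

theorem fold_eq_app3 (powerups : List String) (d : List (String × Int)) :
    add_powerups d powerups =
      app3 d (powerups.count "speed") (powerups.count "strength") (powerups.count "health") := by
  induction powerups generalizing d with
  | nil => simp [add_powerups, app3, bumpKey_zero]
  | cons p rest ih =>
    have step : add_powerups d (p :: rest) =
        add_powerups (if p == "speed" then bumpKey d "speed" 10
          else if p == "strength" then bumpKey d "strength" 5
          else if p == "health" then bumpKey d "health" 20 else d) rest := by
      simp [add_powerups, List.foldl]
    rw [step, ih]
    by_cases hs : p = "speed"
    · subst hs; simp [app3_speed]
    · by_cases ht : p = "strength"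
      · subst ht; simp [app3_strength]
      · by_cases hh : p = "health"
        · subst hh; simp [app3_health]
        · simp [hs, ht, hh]

-- ===== VERDICT (by name: the statement is the Claim_ definition above) =====
theorem add_powerups_spec : Claim_equal_add_powerups := by
  intro player powerups _ _
  unfold Spec_add_powerups
  rw [alt_eq_app3, fold_eq_app3]
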